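-- pv_equiv track=rewrite | github.com/sakthi-vetrivel/art89 | src/HMM/processing.py | converttoint
-- ===== SOURCE A (Python) =====
-- def converttoint(line, wordtonum, numtoword):
--     '''
--     Arguments:
--         line: A string containing a single line of an input poem.
--         wordtonum: A dictionary that maps words to unique integers, where
--                    each integer corresponds to an "emission".
--         numtoword: A dictinoary that maps integer "emissions" back to the
--                    words corresponding to each integer. This is used to
--                    convert emissions to an understandable state.
--     This function removes quotes and fills the dictionaries wordtonum and
--     numtoword so that we can convert from word to int and vice versa. It also
--     converts the line of words into a list of integers, which can be used to
--     train our HMM model.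
--
--     Note: while it seems more intuitive to remove the quotes in the function
--     removechars(), we are doing it here to minimize the number of times
--     that we have to loop over each line of the poem and improve the efficiency
--     of our program.
--
--     Output:
--         converted: A list of integers containing the integers which map to the
--                    words of the line using the numtoword dictionary.
--     '''
--     # splits the line into a list and appends the "\n" string to the end of the
--     # list, because this character was removed from the end of the lines earlier
--     # when reading lines. Including this character allows us to represent
--     # that lines end.
--     line = line.split(' ')
--     line.append("\n")
--     # a list that stores the integers mapping to the words (and "\n") in line.
--     converted = []
--     # these two variables are used for the removal of quotes in lines.
--     quote = False
--     q = "'"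
--
--     # processes every word in the line
--     for word in line:
--         # converts the word to lowercase
--         word = word.lower()
--         # if the first letter of the word is an apostrophe and the word is not
--         # one of our recognized words, then we consider this the start of a
--         # quote and remove the apostrophe and set quote to true.
--
--         if(word[0] == q[0] and (not word.replace(q[0], '') == "tis") and \
--         (not word.replace(q[0], '') == "gainst") and \
--         (not word.replace(q[0], '') == "greeing") and \
--         (not word.replace(q[0], '') == "scaped") and \
--         (not word.replace(q[0], '') == "twixt")):
--             word = word.replace(q[0], '')
--             quote = True
--         # if we have established that we are in a quote, then we remove the
--         # next apostrophe character that we see.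
--         # Note: we could do this in a more sophistocated way: i.e. remove the
--         # apostrophe only if it is the last character of the word and we are
--         # in a quote, but it doesn't appear that issue arises here.
--         # Once we have removed the second apostrophe, we are no longer in a
--         # quote and set quote = False so that we stop looking for the end of
--         # a quote.
--         if quote:
--             if q[0] in word:
--                 word = word.replace(q[0], '')
--                 quote = False
--         # checks if the word is already in the dictionary. If so, it appends
--         # the value it maps to to converted.
--         if word in wordtonum:
--             converted.append(wordtonum[word])
--         # if it is not in the dictionary, word is added to both dictionaries,
--         # and the value it now maps to is appende to converted
--         else:
--             wordtonum[word] = len(wordtonum)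
--             numtoword[len(numtoword)] = word
--             converted.append(wordtonum[word])
--     return converted
-- ===== SOURCE B (Python) =====
-- # Different decomposition: one scan computes the cleaned words via boolean
-- # start/stop quote flags; ids are then assigned by a closed form (existing value,
-- # or base + rank in the first-occurrence list) with the converted list computed
-- # BEFORE the two dicts are mutated in one batch; same dict mutations as A.
-- KEEP = {"tis", "gainst", "greeing", "scaped", "twixt"}
--
--
-- def converttoint(line, wordtonum, numtoword):
--     words = [w.lower() for w in line.split(' ')] + ["\n"]
--     cleaned = []
--     quote = False
--     for low in words:
--         start = low[0] == "'" and low.replace("'", "") not in KEEP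
--         stop = (not start) and quote and "'" in low
--         cleaned.append(low.replace("'", "") if start or stop else low)
--         quote = start or (quote and not stop)
--     # rank-based interning: a new word's id is base + its rank among first occurrences
--     firsts = []
--     for w in cleaned:
--         if w not in wordtonum and w not in firsts:
--             firsts.append(w)
--     base = len(wordtonum)
--     converted = [wordtonum[w] if w in wordtonum else base + firsts.index(w)
--                  for w in cleaned]
--     for w in firsts:
--         wordtonum[w] = len(wordtonum)
--         numtoword[len(numtoword)] = w
--     return converted
-- ===== Notes on version B (the rewrite author's own statement) =====
-- stated objective: alternative
-- what changed: A interleaves quote-stripping with growing the two dicts and reading ids back out of wordtonum word by word; B first computes the cleaned words with boolean start/stop quote flags, then assigns ids by a closed form — an existing word keeps its wordtonum value, a new word gets base + its rank in the first-occurrence list — so the converted list is computed with no dict mutation at all, and both dicts are filled afterwards in one batch.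
import Mathlib
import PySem

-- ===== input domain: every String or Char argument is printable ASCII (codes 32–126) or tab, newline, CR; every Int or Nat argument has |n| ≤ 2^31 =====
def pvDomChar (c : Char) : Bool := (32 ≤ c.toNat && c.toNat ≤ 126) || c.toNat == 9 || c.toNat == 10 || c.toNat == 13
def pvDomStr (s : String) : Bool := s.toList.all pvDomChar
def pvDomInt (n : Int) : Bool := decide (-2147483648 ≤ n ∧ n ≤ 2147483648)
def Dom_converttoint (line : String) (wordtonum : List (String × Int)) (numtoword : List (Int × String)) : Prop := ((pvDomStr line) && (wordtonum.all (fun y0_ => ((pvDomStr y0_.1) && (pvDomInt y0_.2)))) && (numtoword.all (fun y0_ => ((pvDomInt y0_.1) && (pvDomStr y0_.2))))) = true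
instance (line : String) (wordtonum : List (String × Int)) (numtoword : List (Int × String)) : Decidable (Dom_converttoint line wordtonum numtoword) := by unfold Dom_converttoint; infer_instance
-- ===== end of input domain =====

-- B assigns ids by a closed form (base + rank among first occurrences) instead of A's
-- grow-the-dict-as-you-go loop; equivalence is about the RETURN value (both Pythons
-- also mutate the two dicts, identically on all ordinary inputs).

-- ===== PORT A =====
-- loop body of A's single for-loop, as a named step function over the loop state
def pvStepA (st : PySem.Dict String Int × PySem.Dict Int String × List Int × Bool)
    (word : String) : PySem.Dict String Int × PySem.Dict Int String × List Int × Bool :=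
  let d1 := st.1; let d2 := st.2.1; let conv := st.2.2.1; let quote := st.2.2.2
  let word := PySem.Str.lower word
  -- first if: quote start (word[0] raises IndexError on an empty word: outside Pre_)
  let p1 : String × Bool :=
    if (PySem.Str.pyGet? word 0 == some '\'') &&
       !(PySem.Str.replace word "'" "" == "tis") &&
       !(PySem.Str.replace word "'" "" == "gainst") &&
       !(PySem.Str.replace word "'" "" == "greeing") &&
       !(PySem.Str.replace word "'" "" == "scaped") &&
       !(PySem.Str.replace word "'" "" == "twixt") then
      (PySem.Str.replace word "'" "", true)
    else (word, quote)
  -- second if: end of quote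
  let p2 : String × Bool :=
    if p1.2 && PySem.Str.isIn "'" p1.1 then (PySem.Str.replace p1.1 "'" "", false)
    else p1
  let w := p2.1
  if d1.contains w then
    (d1, d2, conv ++ [(d1.get? w).getD 0], p2.2)
  else
    let d1' := d1.insert w (d1.size : Int)
    let d2' := d2.insert (d2.size : Int) w
    (d1', d2', conv ++ [(d1'.get? w).getD 0], p2.2)

def converttoint (line : String) (wordtonum : List (String × Int)) (numtoword : List (Int × String)) : List Int :=
  let words := (PySem.Str.split? line " ").getD [] ++ ["\n"]
  (words.foldl pvStepA (PySem.Dict.mk wordtonum, PySem.Dict.mk numtoword, ([] : List Int), false)).2.2.1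

-- ===== PORT B =====
def pvKeep : PySem.Set String := PySem.Set.ofList ["tis", "gainst", "greeing", "scaped", "twixt"]

-- loop body of B's cleaning scan: boolean start/stop quote flags
def pvCleanStep (st : List String × Bool) (low : String) : List String × Bool :=
  let start := (PySem.Str.pyGet? low 0 == some '\'') &&
               !(PySem.Set.contains pvKeep (PySem.Str.replace low "'" ""))
  let stop := !start && st.2 && PySem.Str.isIn "'" low
  (st.1 ++ [if start || stop then PySem.Str.replace low "'" "" else low],
   start || (st.2 && !stop))

-- loop body of B's first-occurrence scan
def pvFirstStep (d : PySem.Dict String Int) (acc : List String) (w : String) : List String :=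
  if !(d.contains w) && !(acc.contains w) then acc ++ [w] else acc

-- Source B also fills wordtonum/numtoword in a final batch loop; that mutation does not
-- affect the returned list, which is computed before it, so the port returns directly.
-- firsts.index(w) is ported as (index? firsts w).getD 0: w is always a member there.
def converttoint_alt (line : String) (wordtonum : List (String × Int)) (numtoword : List (Int × String)) : List Int :=
  let words := ((PySem.Str.split? line " ").getD []).map PySem.Str.lower ++ ["\n"]
  let cleaned := (words.foldl pvCleanStep (([] : List String), false)).1
  let d := PySem.Dict.mk wordtonum
  let firsts := cleaned.foldl (pvFirstStep d) []
  let base : Int := (d.size : Int)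
  cleaned.map (fun w =>
    if d.contains w then (d.get? w).getD 0
    else base + (((PySem.List.index? firsts w).getD 0 : Nat) : Int))

-- ===== PRECONDITION & SPEC =====
-- Pre_ excludes exactly the lines whose space-split contains an empty word (leading/trailing
-- or doubled spaces, or the empty line): there Python A raises IndexError on word[0] (B too).
def Pre_converttoint (line : String) (wordtonum : List (String × Int)) (numtoword : List (Int × String)) : Prop :=
  ∀ w ∈ (PySem.Str.split? line " ").getD [], w ≠ ""
instance (line : String) (wordtonum : List (String × Int)) (numtoword : List (Int × String)) : Decidable (Pre_converttoint line wordtonum numtoword) := by unfold Pre_converttoint; infer_instance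
def pvWitness_converttoint : String × (List (String × Int)) × (List (Int × String)) :=
  ("'Tis the end' now", [("the", 0)], [(0, "the")])

def Spec_converttoint (line : String) (wordtonum : List (String × Int)) (numtoword : List (Int × String)) (out : List Int) : Prop := out = converttoint_alt line wordtonum numtoword
instance (line : String) (wordtonum : List (String × Int)) (numtoword : List (Int × String)) (out : List Int) : Decidable (Spec_converttoint line wordtonum numtoword out) := by unfold Spec_converttoint; infer_instance

-- ===== CLAIM (what is proved, stated in full; the proofs are below) =====
def Claim_equal_converttoint : Prop := ∀ (line : String) (wordtonum : List (String × Int)) (numtoword : List (Int × String)), Dom_converttoint line wordtonum numtoword → Pre_converttoint line wordtonum numtoword → Spec_converttoint line wordtonum numtoword (converttoint line wordtonum numtoword)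

-- ===== LEMMAS AND PROOFS =====

-- replace(word, "'", "") removes every apostrophe: it is a filter (no PySem lemma names this)
theorem pv_replace_go (fuel : Nat) : ∀ (l acc : List Char), l.length ≤ fuel →
    PySem.Chars.replace.go ['\''] [] fuel l acc = acc.reverse ++ l.filter (fun c => !(c == '\'')) := by
  induction fuel with
  | zero =>
    intro l acc h
    have : l = [] := List.eq_nil_of_length_eq_zero (Nat.le_zero.mp h)
    subst this; simp [PySem.Chars.replace.go]
  | succ n ih =>
    intro l acc h
    cases l with
    | nil => simp [PySem.Chars.replace.go]
    | cons c t =>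
      rw [PySem.Chars.replace.go]
      by_cases hc : c = '\''
      · subst hc
        have hpre : List.isPrefixOf ['\''] ('\'' :: t) = true := by simp [List.isPrefixOf]
        rw [if_pos hpre]
        simp only [List.length_cons, List.length_nil, List.drop_succ_cons, List.drop_zero,
          List.reverse_nil, List.nil_append]
        rw [ih t acc (by simp at h; omega)]
        simp
      · have hpre : List.isPrefixOf ['\''] (c :: t) = false := by
          simp [List.isPrefixOf]; exact fun he => (hc he.symm).elim
        rw [hpre]
        simp only [Bool.false_eq_true, if_false]
        rw [ih t (c :: acc) (by simp at h; omega)]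
        simp [hc]

theorem pv_replace_filter (l : List Char) :
    PySem.Chars.replace l ['\''] [] = l.filter (fun c => !(c == '\'')) := by
  rw [PySem.Chars.replace]
  simp only [List.isEmpty_cons, Bool.false_eq_true, if_false]
  exact pv_replace_go l.length l [] le_rfl

theorem pv_no_apos (s : String) :
    PySem.Str.isIn "'" (PySem.Str.replace s "'" "") = false := by
  rw [PySem.Str.isIn_eq, PySem.Str.toList_replace]
  have h1 : ("'" : String).toList = ['\''] := rfl
  have h2 : ("" : String).toList = ([] : List Char) := rfl
  rw [h1, h2, pv_replace_filter, PySem.Chars.isIn_eq_false_iff]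
  intro hinf
  have hmem : '\'' ∈ (s.toList.filter (fun c => !(c == '\''))) := hinf.mem (by simp)
  simp at hmem

-- proof-side per-word cleaning (the value/flag B's clean scan produces for one raw word)
def pvCleanOne (q : Bool) (w : String) : String × Bool :=
  let low := PySem.Str.lower w
  let start := (PySem.Str.pyGet? low 0 == some '\'') &&
               !(PySem.Set.contains pvKeep (PySem.Str.replace low "'" ""))
  let stop := !start && q && PySem.Str.isIn "'" low
  (if start || stop then PySem.Str.replace low "'" "" else low, start || (q && !stop))

-- proof-side recursive form of the cleaning pass (over the raw words)
def pvCleanR : List String → Bool → List String × Bool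
  | [], q => ([], q)
  | w :: ws, q =>
    let p := pvCleanOne q w
    let r := pvCleanR ws p.2
    (p.1 :: r.1, r.2)

theorem pvCleanStep_lower (st : List String × Bool) (w : String) :
    pvCleanStep st (PySem.Str.lower w) =
      (st.1 ++ [(pvCleanOne st.2 w).1], (pvCleanOne st.2 w).2) := rfl

theorem pvClean_fold (ws : List String) : ∀ (acc : List String) (q : Bool),
    (ws.map PySem.Str.lower).foldl pvCleanStep (acc, q) =
      (acc ++ (pvCleanR ws q).1, (pvCleanR ws q).2) := by
  induction ws with
  | nil => intro acc q; simp [pvCleanR]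
  | cons w ws ih =>
    intro acc q
    simp only [List.map_cons, List.foldl_cons, pvCleanStep_lower, pvCleanR]
    rw [ih]
    simp

-- proof-side interning step (the dict/output part of A's loop body)
def pvInternStep (st : PySem.Dict String Int × PySem.Dict Int String × List Int)
    (word : String) : PySem.Dict String Int × PySem.Dict Int String × List Int :=
  let p : PySem.Dict String Int × PySem.Dict Int String :=
    if !(st.1.contains word) then
      (st.1.insert word (st.1.size : Int), st.2.1.insert (st.2.1.size : Int) word)
    else (st.1, st.2.1)
  (p.1, p.2, st.2.2 ++ [(p.1.get? word).getD 0])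

-- the membership test in pvKeep equals A's chain of five inequalities
theorem pv_cond_eq (b : Bool) (s : String) :
    (b && !(s == "tis") && !(s == "gainst") && !(s == "greeing") && !(s == "scaped") && !(s == "twixt"))
      = (b && !(PySem.Set.contains pvKeep s)) := by
  have hset : pvKeep = ["tis", "gainst", "greeing", "scaped", "twixt"] := by decide
  rw [hset, PySem.Set.contains_eq_listContains]
  simp only [List.contains_cons, List.contains_nil, Bool.or_false]
  simp [Bool.not_or, Bool.and_assoc]

-- one step of A = clean the word, then intern it
theorem pvStepA_eq (d1 : PySem.Dict String Int) (d2 : PySem.Dict Int String)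
    (conv : List Int) (q : Bool) (w : String) :
    pvStepA (d1, d2, conv, q) w =
      ((pvInternStep (d1, d2, conv) (pvCleanOne q w).1).1,
       (pvInternStep (d1, d2, conv) (pvCleanOne q w).1).2.1,
       (pvInternStep (d1, d2, conv) (pvCleanOne q w).1).2.2,
       (pvCleanOne q w).2) := by
  simp only [pvStepA, pvInternStep, pvCleanOne]
  rw [pv_cond_eq]
  by_cases h1 : ((PySem.Str.pyGet? (PySem.Str.lower w) 0 == some '\'') &&
      !(PySem.Set.contains pvKeep (PySem.Str.replace (PySem.Str.lower w) "'" ""))) = true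
  · -- quote start: A's second if cannot fire (no apostrophe left in the stripped word)
    simp only [h1, if_true, Bool.true_and, pv_no_apos, Bool.false_eq_true, if_false,
      Bool.not_true, Bool.false_and, Bool.or_false, Bool.true_or]
    by_cases hc : d1.contains (PySem.Str.replace (PySem.Str.lower w) "'" "") = true <;>
      simp [hc]
  · simp only [h1, Bool.false_eq_true, if_false, Bool.not_false, Bool.true_and, Bool.false_or]
    by_cases h2 : (q && PySem.Str.isIn "'" (PySem.Str.lower w)) = true
    · simp only [h2, if_true]
      by_cases hc : d1.contains (PySem.Str.replace (PySem.Str.lower w) "'" "") = true <;>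
        simp [hc]
    · simp only [h2, Bool.false_eq_true, if_false]
      have h2' : (q && !(q && PySem.Str.isIn "'" (PySem.Str.lower w))) = q := by
        cases q <;> simp_all
      by_cases hc : d1.contains (PySem.Str.lower w) = true <;> simp [hc]

-- fold fusion: A's single loop = clean pass (recursive form) then intern pass
theorem pv_fuse (ws : List String) : ∀ (d1 : PySem.Dict String Int) (d2 : PySem.Dict Int String)
    (conv : List Int) (q : Bool),
    ws.foldl pvStepA (d1, d2, conv, q) =
      (((pvCleanR ws q).1.foldl pvInternStep (d1, d2, conv)).1,
       ((pvCleanR ws q).1.foldl pvInternStep (d1, d2, conv)).2.1,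
       ((pvCleanR ws q).1.foldl pvInternStep (d1, d2, conv)).2.2,
       (pvCleanR ws q).2) := by
  induction ws with
  | nil => intro d1 d2 conv q; simp [pvCleanR]
  | cons w ws ih =>
    intro d1 d2 conv q
    simp only [List.foldl_cons, pvStepA_eq, pvCleanR]
    rw [ih]

-- d extended with fresh keys a₀, a₁, … at values base, base+1, …
def pvExt (d : PySem.Dict String Int) (base : Int) : List String → PySem.Dict String Int
  | [] => d
  | a :: as => pvExt (d.insert a base) (base + 1) as

theorem pvExt_contains (as : List String) : ∀ (d : PySem.Dict String Int) (base : Int) (w : String),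
    (pvExt d base as).contains w = (d.contains w || as.contains w) := by
  induction as with
  | nil => intro d base w; simp [pvExt]
  | cons a as ih =>
    intro d base w
    simp only [pvExt, ih, PySem.Dict.contains_insert, List.contains_cons]
    cases h1 : (w == a) <;> cases h2 : d.contains w <;> simp

theorem pvExt_size (as : List String) : ∀ (d : PySem.Dict String Int) (base : Int),
    as.Nodup → (∀ a ∈ as, d.contains a = false) →
    (pvExt d base as).size = d.size + as.length := by
  induction as with
  | nil => intro d base _ _; simp [pvExt]
  | cons a as ih =>
    intro d base hnd hf
    simp only [pvExt]
    rw [ih _ _ hnd.of_cons (fun x hx => by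
      rw [PySem.Dict.contains_insert]
      have : x ≠ a := by rintro rfl; exact (List.nodup_cons.mp hnd).1 hx
      simp [this, hf x (List.mem_cons_of_mem _ hx)])]
    rw [PySem.Dict.size_insert]
    simp [hf a (List.mem_cons_self), List.length_cons]
    omega

theorem pvExt_get?_of_contains (as : List String) : ∀ (d : PySem.Dict String Int) (base : Int)
    (w : String), d.contains w = true → as.Nodup → (∀ a ∈ as, d.contains a = false) →
    (pvExt d base as).get? w = d.get? w := by
  induction as with
  | nil => intro d base w _ _ _; simp [pvExt]
  | cons a as ih =>
    intro d base w hw hnd hf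
    have hanotin : a ∉ as := (List.nodup_cons.mp hnd).1
    have hne : w ≠ a := by
      intro h
      have h2 := hf a List.mem_cons_self
      rw [← h, hw] at h2
      simp at h2
    have hcw : (d.insert a base).contains w = true := by
      rw [PySem.Dict.contains_insert]; simp [hw]
    have hf' : ∀ x ∈ as, (d.insert a base).contains x = false := by
      intro x hx
      rw [PySem.Dict.contains_insert]
      have hxa : x ≠ a := by intro h; exact hanotin (h ▸ hx)
      simp [hxa, hf x (List.mem_cons_of_mem _ hx)]
    simp only [pvExt]
    rw [ih _ _ _ hcw hnd.of_cons hf']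
    exact PySem.Dict.get?_insert_of_ne _ _ hne

theorem pvExt_get?_of_mem (as : List String) : ∀ (d : PySem.Dict String Int) (base : Int)
    (w : String), w ∈ as → as.Nodup → (∀ a ∈ as, d.contains a = false) →
    (pvExt d base as).get? w = some (base + (((PySem.List.index? as w).getD 0 : Nat) : Int)) := by
  induction as with
  | nil => intro d base w hw; simp at hw
  | cons a as ih =>
    intro d base w hw hnd hf
    have hanotin : a ∉ as := (List.nodup_cons.mp hnd).1
    have hf' : ∀ x ∈ as, (d.insert a base).contains x = false := by
      intro x hx
      rw [PySem.Dict.contains_insert]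
      have hxa : x ≠ a := by intro h; exact hanotin (h ▸ hx)
      simp [hxa, hf x (List.mem_cons_of_mem _ hx)]
    by_cases hwa : w = a
    · subst hwa
      simp only [pvExt]
      rw [pvExt_get?_of_contains as _ _ _ (PySem.Dict.contains_insert_self _ _ _)
          hnd.of_cons hf']
      rw [PySem.Dict.get?_insert_self, PySem.List.index?_cons_self]
      simp
    · have hwas : w ∈ as := by
        rcases List.mem_cons.mp hw with h | h
        · exact absurd h hwa
        · exact h
      simp only [pvExt]
      rw [ih _ _ _ hwas hnd.of_cons hf']
      rw [PySem.List.index?_cons_of_ne _ (fun h => hwa (h.symm))]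
      obtain ⟨k, hk⟩ := (PySem.List.index?_isSome_iff as w).mpr hwas |> Option.isSome_iff_exists.mp
      rw [hk]
      simp only [Option.map_some, Option.getD_some]
      congr 1
      push_cast
      omega

theorem pvExt_snoc (as : List String) : ∀ (d : PySem.Dict String Int) (base : Int) (w : String),
    pvExt d base (as ++ [w]) = (pvExt d base as).insert w (base + (as.length : Int)) := by
  induction as with
  | nil => intro d base w; simp [pvExt]
  | cons a as ih =>
    intro d base w
    simp only [List.cons_append, pvExt, ih]
    congr 1
    push_cast [List.length_cons]
    omega

-- the first-occurrence fold never changes the index of a word already collected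
theorem pvFirsts_index (d : PySem.Dict String Int) (t : List String) :
    ∀ (acc : List String) (w : String), w ∈ acc →
    PySem.List.index? (t.foldl (pvFirstStep d) acc) w = PySem.List.index? acc w := by
  induction t with
  | nil => intro acc w _; simp
  | cons x t ih =>
    intro acc w hw
    simp only [List.foldl_cons, pvFirstStep]
    by_cases hc : (!(d.contains x) && !(acc.contains x)) = true
    · rw [if_pos hc, ih _ _ (List.mem_append_left _ hw)]
      exact PySem.List.index?_append_of_mem _ hw
    · rw [if_neg hc]
      exact ih _ _ hw

-- the intern fold, started from d extended with acc, appends exactly the closed-form ids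
theorem pv_intern_closed (d : PySem.Dict String Int) (ws : List String) :
    ∀ (d2 : PySem.Dict Int String) (conv : List Int) (acc : List String),
    acc.Nodup → (∀ a ∈ acc, d.contains a = false) →
    (ws.foldl pvInternStep (pvExt d (d.size : Int) acc, d2, conv)).2.2
      = conv ++ ws.map (fun w =>
          if d.contains w then (d.get? w).getD 0
          else (d.size : Int) +
            (((PySem.List.index? (ws.foldl (pvFirstStep d) acc) w).getD 0 : Nat) : Int)) := by
  induction ws with
  | nil => intro d2 conv acc _ _; simp
  | cons w t ih =>
    intro d2 conv acc hnd hf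
    simp only [List.foldl_cons, List.map_cons]
    by_cases hdw : d.contains w = true
    · -- existing word: lookup in d; first-occurrence fold skips it
      have hwacc : w ∉ acc := by
        intro h
        have h2 := hf w h
        rw [hdw] at h2
        simp at h2
      have hcontains : (pvExt d (d.size : Int) acc).contains w = true := by
        rw [pvExt_contains]; simp [hdw]
      have hstep : pvInternStep (pvExt d (d.size : Int) acc, d2, conv) w =
          (pvExt d (d.size : Int) acc, d2, conv ++ [(d.get? w).getD 0]) := by
        simp only [pvInternStep, hcontains, Bool.not_true, Bool.false_eq_true, if_false]
        rw [pvExt_get?_of_contains _ _ _ _ hdw hnd hf]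
      have hfs : pvFirstStep d acc w = acc := by
        simp [pvFirstStep, hdw]
      rw [hstep, hfs, ih d2 _ acc hnd hf]
      simp [hdw]
    · have hdw' : d.contains w = false := by cases h : d.contains w; rfl; exact absurd h hdw
      by_cases hwacc : w ∈ acc
      · -- already collected new word: id read back from the extension
        have hcontains : (pvExt d (d.size : Int) acc).contains w = true := by
          rw [pvExt_contains]
          simp only [List.contains_iff_mem, Bool.or_eq_true]
          exact Or.inr hwacc
        have hget := pvExt_get?_of_mem acc d (d.size : Int) w hwacc hnd hf
        have hstep : pvInternStep (pvExt d (d.size : Int) acc, d2, conv) w =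
            (pvExt d (d.size : Int) acc, d2,
             conv ++ [(d.size : Int) + (((PySem.List.index? acc w).getD 0 : Nat) : Int)]) := by
          simp only [pvInternStep, hcontains, Bool.not_true, Bool.false_eq_true, if_false]
          rw [hget]; rfl
        have hfs : pvFirstStep d acc w = acc := by
          simp only [pvFirstStep]
          simp [hwacc]
        rw [hstep, hfs, ih d2 _ acc hnd hf]
        rw [pvFirsts_index d t acc w hwacc]
        simp [hdw']
      · -- genuinely new word: inserted at id base + |acc|, which is its rank in firsts
        have hcontains : (pvExt d (d.size : Int) acc).contains w = false := by
          rw [pvExt_contains, hdw']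
          simp only [Bool.false_or]
          simpa using hwacc
        have hsize : ((pvExt d (d.size : Int) acc).size : Int)
            = (d.size : Int) + (acc.length : Int) := by
          rw [pvExt_size acc d _ hnd hf]; push_cast; ring
        have hins : (pvExt d (d.size : Int) acc).insert w ((pvExt d (d.size : Int) acc).size : Int)
            = pvExt d (d.size : Int) (acc ++ [w]) := by
          rw [pvExt_snoc, hsize]
        have hdisj : acc.Disjoint [w] := by
          intro a ha hm
          rw [List.mem_singleton] at hm
          exact hwacc (hm ▸ ha)
        have hnd' : (acc ++ [w]).Nodup := hnd.append (List.nodup_singleton w) hdisj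
        have hf' : ∀ a ∈ acc ++ [w], d.contains a = false := by
          intro a ha
          rcases List.mem_append.mp ha with h | h
          · exact hf a h
          · simp at h; subst h; exact hdw'
        have hmem' : w ∈ acc ++ [w] := List.mem_append_right _ (List.mem_singleton.mpr rfl)
        have hget := pvExt_get?_of_mem (acc ++ [w]) d (d.size : Int) w hmem' hnd' hf'
        have hidx : PySem.List.index? (acc ++ [w]) w = some acc.length :=
          PySem.List.index?_append_singleton_self acc w hwacc
        have hstep : pvInternStep (pvExt d (d.size : Int) acc, d2, conv) w =
            (pvExt d (d.size : Int) (acc ++ [w]),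
             d2.insert (d2.size : Int) w,
             conv ++ [(d.size : Int) + ((acc.length : Nat) : Int)]) := by
          simp only [pvInternStep, hcontains, Bool.not_false, if_true]
          rw [hins, hget, hidx]
          simp
        have hfs : pvFirstStep d acc w = acc ++ [w] := by
          simp only [pvFirstStep, hdw']
          simp [hwacc]
        rw [hstep, hfs, ih _ _ (acc ++ [w]) hnd' hf']
        rw [pvFirsts_index d t (acc ++ [w]) w hmem', hidx]
        simp [hdw']

-- B's word list is the lowercase image of A's
theorem pv_words_eq (l : List String) :
    l.map PySem.Str.lower ++ ["\n"] = (l ++ ["\n"]).map PySem.Str.lower := by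
  have : PySem.Str.lower "\n" = "\n" := by decide
  simp [this]

-- ===== VERDICT (by name: the statement is the Claim_ definition above) =====
theorem converttoint_spec : Claim_equal_converttoint := by
  unfold Claim_equal_converttoint
  intro line wordtonum numtoword _ _
  simp only [Spec_converttoint, converttoint, converttoint_alt]
  rw [pv_words_eq, pvClean_fold]
  rw [pv_fuse]
  simp only [List.nil_append]
  have := pv_intern_closed (PySem.Dict.mk wordtonum)
    (pvCleanR ((PySem.Str.split? line " ").getD [] ++ ["\n"]) false).1
    (PySem.Dict.mk numtoword) [] [] List.nodup_nil (by simp)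
  simpa [pvExt] using this
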